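-- pv_equiv track=rewrite | github.com/nathanfdunn/MITE | MITE.py | findRecursonyms
-- ===== SOURCE A (Python) =====
-- from collections import defaultdict
--
-- def calcKey(word):
--     return ''.join(sorted(set(word)))
--
-- def uniqueStart(stringList):
--     return len({ x[0] for x in stringList })
--
-- def findRecursonyms(length, wordList):
--     sizedWords = [x for x in wordList if len(x) == length]
--
--     wordMap = defaultdict(list)
--     for word in sizedWords:
--         key = calcKey(word)
--         if len(key) == length:
--             wordMap[key].append(word)
--
--     wordMap = { key : wordMap[key] for key in wordMap
--                     if uniqueStart(wordMap[key]) == length }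
--     return wordMap
-- ===== SOURCE B (Python) =====
-- def calcKey(word):
--     return ''.join(sorted(set(word)))
--
-- def findRecursonyms(length, wordList):
--     sized = [w for w in wordList if len(w) == length]
--     keyed = [(calcKey(w), w) for w in sized]
--     result = {}
--     seen = set()
--     for k, w in keyed:
--         if len(k) == length and k not in seen:
--             seen.add(k)
--             group = [x for kk, x in keyed if kk == k]
--             if len({x[0] for x in group}) == length:
--                 result[k] = group
--     return result
-- ===== Notes on version B (the rewrite author's own statement) =====
-- stated objective: alternative
-- what changed: B abandons A's defaultdict accumulation: it keys the sized words once, then walks them with a first-occurrence seen-set and rescans the keyed list to materialize each new qualifying key's whole group up front, applying the unique-start filter at emission time instead of in a second dict comprehension.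
import Mathlib
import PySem

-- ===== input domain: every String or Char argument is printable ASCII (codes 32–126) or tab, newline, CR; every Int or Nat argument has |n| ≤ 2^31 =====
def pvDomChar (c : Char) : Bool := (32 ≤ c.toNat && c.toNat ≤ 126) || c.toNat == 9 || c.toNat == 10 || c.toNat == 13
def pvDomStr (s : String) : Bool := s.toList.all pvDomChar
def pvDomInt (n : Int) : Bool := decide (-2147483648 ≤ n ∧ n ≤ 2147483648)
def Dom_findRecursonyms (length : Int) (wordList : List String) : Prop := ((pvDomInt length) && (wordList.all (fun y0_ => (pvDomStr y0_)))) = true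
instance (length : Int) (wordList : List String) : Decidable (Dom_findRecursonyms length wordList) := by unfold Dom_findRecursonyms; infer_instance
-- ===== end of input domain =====

-- B replaces A's defaultdict accumulation by one first-occurrence pass that rescans the keyed
-- list for each new qualifying key (objective: alternative, not faster). Return-value equivalence only.

-- ===== PORT A =====
-- ''.join(sorted(set(word)))
def calcKey (word : String) : String :=
  String.ofList (PySem.List.sorted (PySem.Set.ofList word.toList) (fun c => c))

-- len({ x[0] for x in stringList }); x[0] ported as headD ' ': exact for nonempty strings
-- (under Pre_ every string uniqueStart sees is nonempty; Python raises IndexError otherwise)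
def uniqueStart (stringList : List String) : Int :=
  ((PySem.Set.ofList (stringList.map (fun x => x.toList.headD ' '))).length : Int)

def findRecursonyms (length : Int) (wordList : List String) : List (String × List String) :=
  let sizedWords := wordList.filter (fun x => decide (PySem.Str.len x = length))
  let wordMap := sizedWords.foldl (fun (d : PySem.Dict String (List String)) word =>
      let key := calcKey word
      if PySem.Str.len key = length then d.modify key [] (fun v => v ++ [word]) else d)
    PySem.Dict.empty
  -- the final dict comprehension iterates wordMap's keys in order; keys are unique, so it is the filter of the items
  wordMap.items.filter (fun kv => decide (uniqueStart kv.2 = length))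

-- ===== PORT B =====
def findRecursonyms_alt (length : Int) (wordList : List String) : List (String × List String) :=
  let sized := wordList.filter (fun w => decide (PySem.Str.len w = length))
  let keyed := sized.map (fun w => (calcKey w, w))
  (keyed.foldl (fun (st : List (String × List String) × PySem.Set String) kw =>
      if PySem.Str.len kw.1 = length ∧ kw.1 ∉ st.2 then
        if uniqueStart ((keyed.filter (fun p => decide (p.1 = kw.1))).map (fun p => p.2)) = length
        then (st.1 ++ [(kw.1, (keyed.filter (fun p => decide (p.1 = kw.1))).map (fun p => p.2))], st.2.add kw.1)
        else (st.1, st.2.add kw.1)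
      else st)
    ([], PySem.Set.empty)).1

-- ===== PRECONDITION & SPEC =====
-- Pre_ excludes exactly the inputs where the Python A raises IndexError (x[0] on the empty
-- string: length = 0 with '' in the list); Python B raises there too.
def Pre_findRecursonyms (length : Int) (wordList : List String) : Prop :=
  ¬ (length = 0 ∧ "" ∈ wordList)
instance (length : Int) (wordList : List String) : Decidable (Pre_findRecursonyms length wordList) := by unfold Pre_findRecursonyms; infer_instance

def pvWitness_findRecursonyms : Int × List String := (3, ["cat", "act", "tac", "dog"])

def Spec_findRecursonyms (length : Int) (wordList : List String) (out : List (String × List String)) : Prop := out = findRecursonyms_alt length wordList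
instance (length : Int) (wordList : List String) (out : List (String × List String)) : Decidable (Spec_findRecursonyms length wordList out) := by unfold Spec_findRecursonyms; infer_instance

-- ===== CLAIM (what is proved, stated in full; the proofs are below) =====
def Claim_equal_findRecursonyms : Prop := ∀ (length : Int) (wordList : List String), Dom_findRecursonyms length wordList → Pre_findRecursonyms length wordList → Spec_findRecursonyms length wordList (findRecursonyms length wordList)

-- ===== LEMMAS AND PROOFS =====

-- a fold whose step is the identity off p is the fold over the p-filtered list
theorem pv_foldl_guard_filter {α β : Type} (p : α → Prop) [DecidablePred p]
    (g : β → α → β) (l : List α) (init : β) :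
    l.foldl (fun acc x => if p x then g acc x else acc) init
      = (l.filter (fun x => decide (p x))).foldl g init := by
  induction l generalizing init with
  | nil => rfl
  | cons x t ih =>
    by_cases hx : p x <;> simp [hx, ih]

-- A's defaultdict loop (restricted to the qualifying words qs), as an explicit association list
theorem pv_A_items (qs : List String) :
    (qs.foldl (fun (d : PySem.Dict String (List String)) w =>
        d.modify (calcKey w) [] (fun v => v ++ [w])) PySem.Dict.empty).items
      = (PySem.Set.ofList (qs.map calcKey)).map
          (fun k => (k, qs.filter (fun w => decide (calcKey w = k)))) := by
  set D := qs.foldl (fun (d : PySem.Dict String (List String)) w =>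
      d.modify (calcKey w) [] (fun v => v ++ [w])) PySem.Dict.empty with hD
  have hkeys : D.keys = PySem.Set.ofList (qs.map calcKey) := by
    rw [hD, PySem.Dict.keys_foldl_modify_key qs calcKey [] (fun _ w v => v ++ [w])]
    simp [PySem.Dict.keys_empty, PySem.Set.update_nil_left]
  have hnd : D.keys.Nodup := by
    rw [hkeys]; exact PySem.Set.nodup_ofList _
  have hget : ∀ k, D.getD k [] = qs.filter (fun w => decide (calcKey w = k)) := by
    intro k
    have hfm : D = (qs.map (fun w => (calcKey w, w))).foldl
        (fun d p => d.modify p.1 [] (fun v => v ++ [p.2])) PySem.Dict.empty := by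
      rw [hD, List.foldl_map]
    rw [hfm, PySem.Dict.getD_foldl_modify_append]
    simp only [PySem.Dict.getD_empty, List.nil_append, List.filter_map, List.map_map,
      Function.comp_def]
    rw [show (fun x : String => x) = id from rfl, List.map_id]
    exact List.filter_congr (fun w _ => by by_cases h : calcKey w = k <;> simp [h])
  rw [PySem.Dict.items_eq_map_keys D hnd [], hkeys]
  exact List.map_congr_left (fun k _ => by rw [hget k])

-- B's loop, run from any seen-set s whose matching result component is already in closed form
theorem pv_B_loop (L : Int) (keyed : List (String × String)) :
    ∀ (suf : List (String × String)) (s : PySem.Set String),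
    (suf.foldl (fun (st : List (String × List String) × PySem.Set String) kw =>
        if PySem.Str.len kw.1 = L ∧ kw.1 ∉ st.2 then
          if uniqueStart ((keyed.filter (fun p => decide (p.1 = kw.1))).map (fun p => p.2)) = L
          then (st.1 ++ [(kw.1, (keyed.filter (fun p => decide (p.1 = kw.1))).map (fun p => p.2))], st.2.add kw.1)
          else (st.1, st.2.add kw.1)
        else st)
      ((s.map (fun k => (k, (keyed.filter (fun p => decide (p.1 = k))).map (fun p => p.2)))).filter
          (fun kv => decide (uniqueStart kv.2 = L)), s)).1
    = ((PySem.Set.update s ((suf.filter (fun p => decide (PySem.Str.len p.1 = L))).map (fun p => p.1))).map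
          (fun k => (k, (keyed.filter (fun p => decide (p.1 = k))).map (fun p => p.2)))).filter
        (fun kv => decide (uniqueStart kv.2 = L)) := by
  intro suf
  induction suf with
  | nil => intro s; simp [PySem.Set.update_nil]
  | cons kw t ih =>
    intro s
    by_cases hlen : PySem.Str.len kw.1 = L
    · by_cases hmem : kw.1 ∈ s
      · simp only [List.foldl_cons, List.filter_cons, hlen, decide_true, if_true,
          List.map_cons, PySem.Set.update_cons, PySem.Set.add_of_mem hmem]
        rw [if_neg (by simp [hmem])]
        exact ih s
      · simp only [List.foldl_cons, List.filter_cons, hlen, decide_true, if_true,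
          List.map_cons, PySem.Set.update_cons]
        rw [if_pos (by simp [hmem])]
        have hval : ((s.add kw.1).map (fun k => (k, (keyed.filter (fun p => decide (p.1 = k))).map (fun p => p.2)))).filter
              (fun kv => decide (uniqueStart kv.2 = L))
            = (s.map (fun k => (k, (keyed.filter (fun p => decide (p.1 = k))).map (fun p => p.2)))).filter
              (fun kv => decide (uniqueStart kv.2 = L))
              ++ (if uniqueStart ((keyed.filter (fun p => decide (p.1 = kw.1))).map (fun p => p.2)) = L
                  then [(kw.1, (keyed.filter (fun p => decide (p.1 = kw.1))).map (fun p => p.2))] else []) := by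
          rw [PySem.Set.add_of_not_mem hmem]
          by_cases hu : uniqueStart ((keyed.filter (fun p => decide (p.1 = kw.1))).map (fun p => p.2)) = L <;>
            simp [hu, List.filter_append]
        have hrec := ih (s.add kw.1)
        rw [hval] at hrec
        by_cases hu : uniqueStart ((keyed.filter (fun p => decide (p.1 = kw.1))).map (fun p => p.2)) = L
        · rw [if_pos hu]
          rw [if_pos hu] at hrec
          exact hrec
        · rw [if_neg hu]
          rw [if_neg hu, List.append_nil] at hrec
          exact hrec
    · simp only [List.foldl_cons, List.filter_cons, hlen, decide_false, Bool.false_eq_true,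
        if_false]
      rw [if_neg (by simp)]
      exact ih s

-- ===== VERDICT (by name: the statement is the Claim_ definition above) =====
theorem findRecursonyms_spec : Claim_equal_findRecursonyms := by
  intro L ws _ _
  unfold Spec_findRecursonyms findRecursonyms findRecursonyms_alt
  dsimp only
  set sized := ws.filter (fun w => decide (PySem.Str.len w = L))
  set keyed := sized.map (fun w => (calcKey w, w)) with hkeyed
  set qs := sized.filter (fun w => decide (PySem.Str.len (calcKey w) = L)) with hqs
  -- A side
  have hA : (sized.foldl (fun (d : PySem.Dict String (List String)) word =>
        if PySem.Str.len (calcKey word) = L then d.modify (calcKey word) [] (fun v => v ++ [word]) else d)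
      PySem.Dict.empty).items
      = (PySem.Set.ofList (qs.map calcKey)).map
          (fun k => (k, qs.filter (fun w => decide (calcKey w = k)))) := by
    rw [pv_foldl_guard_filter (fun w => PySem.Str.len (calcKey w) = L)]
    exact pv_A_items qs
  -- B side: instantiate the loop lemma at the empty seen set
  have hB := pv_B_loop L keyed keyed PySem.Set.empty
  simp only [PySem.Set.empty, List.map_nil, List.filter_nil, PySem.Set.update_nil_left] at hB
  simp only [PySem.Set.empty]
  rw [hB]
  -- the two key lists coincide
  have hkeysEq : (keyed.filter (fun p => decide (PySem.Str.len p.1 = L))).map (fun p => p.1)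
      = qs.map calcKey := by
    simp [hkeyed, hqs, List.filter_map, List.map_map, Function.comp_def]
  rw [hA, hkeysEq]
  -- per key in the set, the two groups coincide
  congr 1
  apply List.map_congr_left
  intro k hk
  have hkL : PySem.Str.len k = L := by
    rcases List.mem_map.mp ((PySem.Set.mem_ofList _ _).mp hk) with ⟨w, hw, rfl⟩
    rw [hqs] at hw
    exact of_decide_eq_true (List.mem_filter.mp hw).2
  have hgrp : (keyed.filter (fun p => decide (p.1 = k))).map (fun p => p.2)
      = qs.filter (fun w => decide (calcKey w = k)) := by
    have h1 : (keyed.filter (fun p => decide (p.1 = k))).map (fun p => p.2)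
        = sized.filter (fun w => decide (calcKey w = k)) := by
      simp [hkeyed, List.filter_map, List.map_map, Function.comp_def]
    have h2 : qs.filter (fun w => decide (calcKey w = k))
        = sized.filter (fun w => decide (calcKey w = k) && decide (PySem.Str.len (calcKey w) = L)) := by
      simp [hqs, List.filter_filter]
    have h3 : sized.filter (fun w => decide (calcKey w = k) && decide (PySem.Str.len (calcKey w) = L))
        = sized.filter (fun w => decide (calcKey w = k)) := by
      apply List.filter_congr
      intro w _
      by_cases hwk : calcKey w = k
      · simp only [hwk]
        simpa using hkL
      · simp [hwk]
    rw [h1, h2, h3]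
  rw [hgrp]
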